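-- pv_equiv track=rewrite | github.com/winvu88888888-maker/tinnam888888 | test_column_forensic.py | m_conditional_prev
-- ===== SOURCE A (Python) =====
-- from collections import Counter, defaultdict
--
-- def m_transition(h, pos):
--     trans = defaultdict(Counter)
--     for i in range(len(h)-1):
--         trans[h[i][pos]][h[i+1][pos]] += 1
--     lv = h[-1][pos]
--     if lv in trans and trans[lv]:
--         return trans[lv].most_common(1)[0][0]
--     return lv
--
-- def m_conditional_prev(h, pos):
--     """Predict pos based on previous position's value in SAME draw."""
--     if pos == 0: return m_transition(h, pos)
--     trans = defaultdict(Counter)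
--     for x in h:
--         trans[x[pos-1]][x[pos]] += 1
--     pv = h[-1][pos-1]
--     if pv in trans and trans[pv]:
--         return trans[pv].most_common(1)[0][0]
--     return h[-1][pos]
-- ===== SOURCE B (Python) =====
-- def m_conditional_prev(h, pos):
--     """Predict pos based on previous position's value in SAME draw."""
--     if pos == 0:
--         pv = h[-1][0]
--         vals = [h[i + 1][0] for i in range(len(h) - 1) if h[i][0] == pv]
--     else:
--         pv = h[-1][pos - 1]
--         vals = [x[pos] for x in h if x[pos - 1] == pv]
--     best = None
--     best_count = 0
--     seen = set()
--     for v in vals: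
--         if v in seen:
--             continue
--         seen.add(v)
--         c = vals.count(v)
--         if c > best_count:
--             best, best_count = v, c
--     return h[-1][pos] if best is None else best
-- ===== Notes on version B (the rewrite author's own statement) =====
-- stated objective: alternative
-- what changed: B uses no Counter/dict at all: it extracts the successor values of the last row's conditioning value into a flat list and finds the mode by a running strict-argmax scan over first occurrences (a seen-set plus list.count per distinct value), whereas A builds a full predecessor-to-Counter transition table and asks most_common; the trade is O(n*k) rescanning instead of A's hashed O(n) counting, for a shorter dependency-free mode computation.
import Mathlib
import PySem

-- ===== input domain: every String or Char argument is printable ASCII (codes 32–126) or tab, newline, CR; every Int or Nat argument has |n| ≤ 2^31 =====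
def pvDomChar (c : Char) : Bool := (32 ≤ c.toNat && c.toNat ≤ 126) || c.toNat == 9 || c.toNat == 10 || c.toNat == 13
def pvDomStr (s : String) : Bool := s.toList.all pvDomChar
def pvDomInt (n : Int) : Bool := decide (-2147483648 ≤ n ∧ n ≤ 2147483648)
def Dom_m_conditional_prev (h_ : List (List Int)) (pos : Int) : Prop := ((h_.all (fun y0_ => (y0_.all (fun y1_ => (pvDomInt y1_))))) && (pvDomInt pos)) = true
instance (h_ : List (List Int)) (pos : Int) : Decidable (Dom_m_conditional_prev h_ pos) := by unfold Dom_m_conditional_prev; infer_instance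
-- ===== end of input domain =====

-- B drops A's nested defaultdict(Counter) table entirely: it extracts the relevant successor
-- values into a flat list and finds the mode by a running strict-argmax over first occurrences
-- (seen-set + list.count), an alternative dict-free decomposition of the same prediction.

-- shared helper: Counter.most_common(1)[0][0] — the first key attaining the maximal count
-- (exact: most_common's tie-break is insertion order, = PySem.List.max?'s first-extremal rule);
-- the default argument is only reached on an empty Counter, which the caller guards against
def pvMode (c : PySem.Dict Int Int) (dflt : Int) : Int :=
  match PySem.List.max? c.items (fun p => p.2) with
  | some p => p.1
  | none => dflt

-- ===== PORT A =====
def m_transition_port (h_ : List (List Int)) (pos : Int) : Int :=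
  let trans := (PySem.List.pyRange 0 ((h_.length : Int) - 1) 1).foldl
    (fun d i =>
      d.modify (PySem.List.pyGetD (PySem.List.pyGetD h_ i []) pos 0) PySem.Dict.empty
        (fun c => c.modify (PySem.List.pyGetD (PySem.List.pyGetD h_ (i + 1) []) pos 0) 0 (· + 1)))
    PySem.Dict.empty
  let lv := PySem.List.pyGetD (PySem.List.pyGetD h_ (-1) []) pos 0
  if trans.contains lv ∧ (trans.getD lv PySem.Dict.empty).items ≠ [] then
    pvMode (trans.getD lv PySem.Dict.empty) 0
  else lv

def m_conditional_prev (h_ : List (List Int)) (pos : Int) : Int :=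
  if pos = 0 then m_transition_port h_ pos
  else
    let trans := h_.foldl
      (fun d x =>
        d.modify (PySem.List.pyGetD x (pos - 1) 0) PySem.Dict.empty
          (fun c => c.modify (PySem.List.pyGetD x pos 0) 0 (· + 1)))
      PySem.Dict.empty
    let pv := PySem.List.pyGetD (PySem.List.pyGetD h_ (-1) []) (pos - 1) 0
    if trans.contains pv ∧ (trans.getD pv PySem.Dict.empty).items ≠ [] then
      pvMode (trans.getD pv PySem.Dict.empty) 0
    else PySem.List.pyGetD (PySem.List.pyGetD h_ (-1) []) pos 0

-- ===== PORT B =====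
def m_conditional_prev_alt (h_ : List (List Int)) (pos : Int) : Int :=
  let vals : List Int :=
    if pos = 0 then
      let pv := PySem.List.pyGetD (PySem.List.pyGetD h_ (-1) []) 0 0
      (PySem.List.pyRange 0 ((h_.length : Int) - 1) 1).foldl
        (fun acc i =>
          if PySem.List.pyGetD (PySem.List.pyGetD h_ i []) 0 0 = pv then
            acc ++ [PySem.List.pyGetD (PySem.List.pyGetD h_ (i + 1) []) 0 0]
          else acc) []
    else
      let pv := PySem.List.pyGetD (PySem.List.pyGetD h_ (-1) []) (pos - 1) 0
      h_.foldl
        (fun acc x =>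
          if PySem.List.pyGetD x (pos - 1) 0 = pv then acc ++ [PySem.List.pyGetD x pos 0]
          else acc) []
  -- for v in vals: skip if v in seen; seen.add(v); c = vals.count(v); if c > best_count: update
  let st := vals.foldl
    (fun (st : PySem.Set Int × Option Int × Int) v =>
      if PySem.Set.contains st.1 v then st
      else (PySem.Set.add st.1 v,
            if st.2.2 < (PySem.List.count vals v : Int) then (some v, (PySem.List.count vals v : Int))
            else st.2))
    (PySem.Set.empty, none, 0)
  match st.2.1 with
  | some b => b
  | none => PySem.List.pyGetD (PySem.List.pyGetD h_ (-1) []) pos 0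

-- ===== PRECONDITION & SPEC =====
-- Pre_ excludes exactly the inputs where Python A raises an IndexError: an empty h,
-- or a row too short for the (possibly negative) indices pos and pos-1.
def Pre_m_conditional_prev (h_ : List (List Int)) (pos : Int) : Prop :=
  h_ ≠ [] ∧ ∀ x ∈ h_, PySem.Raise.InRange x.length pos ∧ PySem.Raise.InRange x.length (pos - 1)
instance (h_ : List (List Int)) (pos : Int) : Decidable (Pre_m_conditional_prev h_ pos) := by
  unfold Pre_m_conditional_prev; infer_instance

def pvWitness_m_conditional_prev : List (List Int) × Int := ([[1, 2], [1, 3], [1, 2]], 1)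

def Spec_m_conditional_prev (h_ : List (List Int)) (pos : Int) (out : Int) : Prop := out = m_conditional_prev_alt h_ pos
instance (h_ : List (List Int)) (pos : Int) (out : Int) : Decidable (Spec_m_conditional_prev h_ pos out) := by unfold Spec_m_conditional_prev; infer_instance

-- ===== CLAIM (what is proved, stated in full; the proofs are below) =====
def Claim_equal_m_conditional_prev : Prop := ∀ (h_ : List (List Int)) (pos : Int), Dom_m_conditional_prev h_ pos → Pre_m_conditional_prev h_ pos → Spec_m_conditional_prev h_ pos (m_conditional_prev h_ pos)

-- ===== LEMMAS AND PROOFS =====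

-- looking up one key of the grouping fold = folding over the rows with that key
lemma pv_getD_foldl {α : Type} (l : List α) (key : α → Int)
    (g : α → PySem.Dict Int Int → PySem.Dict Int Int)
    (d : PySem.Dict Int (PySem.Dict Int Int)) (c : Int) :
    (l.foldl (fun d x => d.modify (key x) PySem.Dict.empty (g x)) d).getD c PySem.Dict.empty
      = (l.filter (fun x => decide (key x = c))).foldl (fun acc x => g x acc)
          (d.getD c PySem.Dict.empty) := by
  induction l generalizing d with
  | nil => rfl
  | cons x t ih =>
    simp only [List.foldl_cons, List.filter_cons]
    rw [ih, PySem.Dict.getD_modify]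
    by_cases hx : key x = c
    · simp [hx]
    · rw [if_neg (fun h : c = key x => hx h.symm)]
      simp [hx]

-- the grouping fold contains a key iff the start dict does or some row carries it
lemma pv_contains_foldl {α : Type} (l : List α) (key : α → Int)
    (g : α → PySem.Dict Int Int → PySem.Dict Int Int)
    (d₀ : PySem.Dict Int (PySem.Dict Int Int)) (c : Int) :
    (l.foldl (fun d x => d.modify (key x) PySem.Dict.empty (g x)) d₀).contains c = true
      ↔ d₀.contains c = true ∨ ∃ x ∈ l, key x = c := by
  induction l generalizing d₀ with
  | nil => simp
  | cons x t ih =>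
    rw [List.foldl_cons, ih, PySem.Dict.contains_modify]
    simp only [beq_iff_eq, Bool.or_eq_true, List.mem_cons]
    constructor
    · rintro (⟨h | h⟩ | h)
      · exact Or.inr ⟨x, Or.inl rfl, h.symm⟩
      · exact Or.inl h
      · obtain ⟨y, hy, hk⟩ := h; exact Or.inr ⟨y, Or.inr hy, hk⟩
    · rintro (h | ⟨y, (rfl | hy), hk⟩)
      · exact Or.inl (Or.inr h)
      · exact Or.inl (Or.inl hk.symm)
      · exact Or.inr ⟨y, hy, hk⟩

-- A's nested-table branch = 'if the filtered value list is empty then fallback else mode of its Counter'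
lemma pv_core {α : Type} (l : List α) (key val : α → Int) (pv fb : Int) :
    (if (l.foldl (fun d x => d.modify (key x) PySem.Dict.empty
            (fun c => c.modify (val x) 0 (· + 1))) (PySem.Dict.empty : PySem.Dict Int (PySem.Dict Int Int))).contains pv
        ∧ ((l.foldl (fun d x => d.modify (key x) PySem.Dict.empty
            (fun c => c.modify (val x) 0 (· + 1))) (PySem.Dict.empty : PySem.Dict Int (PySem.Dict Int Int))).getD pv PySem.Dict.empty).items ≠ [] then
       pvMode ((l.foldl (fun d x => d.modify (key x) PySem.Dict.empty
            (fun c => c.modify (val x) 0 (· + 1))) (PySem.Dict.empty : PySem.Dict Int (PySem.Dict Int Int))).getD pv PySem.Dict.empty) 0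
     else fb)
    = (if l.foldl (fun acc x => if key x = pv then acc ++ [val x] else acc) ([] : List Int) = [] then fb
       else pvMode (PySem.Dict.counter
           (l.foldl (fun acc x => if key x = pv then acc ++ [val x] else acc) [])) 0) := by
  have hFf : l.foldl (fun acc x => if key x = pv then acc ++ [val x] else acc) ([] : List Int)
      = (l.filter (fun x => decide (key x = pv))).map val := by
    rw [PySem.List.foldl_append_ite]
    simp
  have hget : (l.foldl
        (fun d x => d.modify (key x) PySem.Dict.empty
          (fun c => c.modify (val x) 0 (· + 1))) (PySem.Dict.empty : PySem.Dict Int (PySem.Dict Int Int))).getD pv PySem.Dict.empty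
      = PySem.Dict.counter ((l.filter (fun x => decide (key x = pv))).map val) := by
    rw [pv_getD_foldl l key (fun x => fun c => c.modify (val x) 0 (· + 1)) PySem.Dict.empty pv]
    rw [PySem.Dict.counter_eq_foldl, List.foldl_map]
    simp [PySem.Dict.getD_empty]
  have hcont : (l.foldl
        (fun d x => d.modify (key x) PySem.Dict.empty
          (fun c => c.modify (val x) 0 (· + 1))) (PySem.Dict.empty : PySem.Dict Int (PySem.Dict Int Int))).contains pv = true
      ↔ ∃ x ∈ l, key x = pv := by
    rw [pv_contains_foldl l key (fun x => fun c => c.modify (val x) 0 (· + 1)) PySem.Dict.empty pv]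
    simp [PySem.Dict.contains_empty]
  by_cases hN : (l.filter (fun x => decide (key x = pv))) = []
  · have hF0 : l.foldl (fun acc x => if key x = pv then acc ++ [val x] else acc) ([] : List Int) = [] := by
      rw [hFf, hN]; rfl
    rw [hF0]
    have : ¬ ((l.foldl
        (fun d x => d.modify (key x) PySem.Dict.empty
          (fun c => c.modify (val x) 0 (· + 1))) (PySem.Dict.empty : PySem.Dict Int (PySem.Dict Int Int))).contains pv = true
        ∧ ((l.foldl
        (fun d x => d.modify (key x) PySem.Dict.empty
          (fun c => c.modify (val x) 0 (· + 1))) (PySem.Dict.empty : PySem.Dict Int (PySem.Dict Int Int))).getD pv PySem.Dict.empty).items ≠ []) := by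
      rintro ⟨hc, -⟩
      obtain ⟨x, hx, hk⟩ := hcont.mp hc
      have : x ∈ l.filter (fun x => decide (key x = pv)) := by
        simp [List.mem_filter, hx, hk]
      rw [hN] at this; exact absurd this (List.not_mem_nil)
    rw [if_neg this, if_pos rfl]
  · obtain ⟨y, ys, hys⟩ := List.exists_cons_of_ne_nil hN
    have hFne : l.foldl (fun acc x => if key x = pv then acc ++ [val x] else acc) ([] : List Int)
        = val y :: ys.map val := by rw [hFf, hys, List.map_cons]
    have hitems : (PySem.Dict.counter ((l.filter (fun x => decide (key x = pv))).map val)).items ≠ [] := by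
      rw [PySem.Dict.items_counter, hys, List.map_cons]
      intro hcontra
      have : val y ∈ PySem.Set.ofList (val y :: ys.map val) := by
        rw [PySem.Set.mem_ofList]; exact List.mem_cons_self
      rw [List.map_eq_nil_iff.mp hcontra] at this
      exact absurd this (List.not_mem_nil)
    have hmem : y ∈ l.filter (fun x => decide (key x = pv)) := by rw [hys]; exact List.mem_cons_self
    have hyl : y ∈ l := (List.mem_filter.mp hmem).1
    have hyk : key y = pv := by have := (List.mem_filter.mp hmem).2; simpa using this
    have hc : (l.foldl
        (fun d x => d.modify (key x) PySem.Dict.empty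
          (fun c => c.modify (val x) 0 (· + 1))) (PySem.Dict.empty : PySem.Dict Int (PySem.Dict Int Int))).contains pv = true :=
      hcont.mpr ⟨y, hyl, hyk⟩
    rw [if_pos ⟨hc, by rw [hget]; exact hitems⟩, hget, hFf]
    rw [if_neg (by rw [hys, List.map_cons]; exact List.cons_ne_nil _ _)]

-- the seen-set skip loop processes exactly the first occurrences, in order
lemma pv_seen_fold {β : Type} (l : List Int) (g : Int → β → β) (seen : PySem.Set Int) (s : β) :
    (l.foldl (fun st v =>
        if PySem.Set.contains st.1 v then st
        else (PySem.Set.add st.1 v, g v st.2)) (seen, s)).2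
    = ((PySem.Set.ofList l).filter (fun v => !(PySem.Set.contains seen v))).foldl
        (fun s v => g v s) s := by
  induction l generalizing seen s with
  | nil => rfl
  | cons v t ih =>
    simp only [List.foldl_cons, PySem.Set.ofList_cons, List.filter_cons]
    by_cases hv : PySem.Set.contains seen v = true
    · rw [if_pos hv]
      rw [ih seen s, hv]
      simp only [Bool.not_true, Bool.false_eq_true, if_false]
      congr 1
      rw [PySem.Set.discard, List.filter_filter]
      refine (List.filter_congr ?_).symm
      intro a _
      have hvm : v ∈ seen := by simpa [PySem.Set.contains] using hv
      by_cases hav : a = v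
      · subst hav; simp [PySem.Set.contains, hvm]
      · simp [PySem.Set.contains, hav]
    · rw [if_neg hv]
      rw [ih (PySem.Set.add seen v) (g v s)]
      rw [Bool.not_eq_true] at hv
      simp only [hv, Bool.not_false, if_true, List.foldl_cons]
      congr 1
      rw [PySem.Set.discard, List.filter_filter, PySem.Set.add, hv, if_neg (by simp)]
      refine List.filter_congr ?_
      intro a _
      by_cases hav : a = v
      · subst hav; simp [PySem.Set.contains]
      · simp [PySem.Set.contains, hav]
  
-- running strict-argmax over a pair list, from an already-seen first element
def pvMaxRun (ps : List (Int × Int)) (m : Int × Int) : Int × Int :=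
  ps.foldl (fun a x => if a.2 < x.2 then x else a) m

lemma pv_fold_argmax (ps : List (Int × Int)) (m : Int × Int) :
    ps.foldl (fun (s : Option Int × Int) p => if s.2 < p.2 then (some p.1, p.2) else s)
        (some m.1, m.2)
    = (some (pvMaxRun ps m).1, (pvMaxRun ps m).2) := by
  induction ps generalizing m with
  | nil => rfl
  | cons p t ih =>
    simp only [List.foldl_cons, pvMaxRun]
    by_cases h : m.2 < p.2
    · simp only [if_pos h]
      exact ih p
    · simp only [if_neg h]
      exact ih m

-- PySem.List.max? on a cons is the running strict-argmax from the head
lemma pv_max?_cons (ps : List (Int × Int)) (m : Int × Int) :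
    PySem.List.max? (m :: ps) (fun p => p.2) = some (pvMaxRun ps m) := by
  show List.foldl _ (some m) ps = _
  induction ps generalizing m with
  | nil => rfl
  | cons p t ih =>
    simp only [List.foldl_cons, pvMaxRun]
    by_cases h : m.2 < p.2
    · simp only [if_pos h]
      exact ih p
    · simp only [if_neg h]
      exact ih m

-- B's seen-set argmax loop = 'if vals empty then fallback else mode of Counter(vals)'
lemma pv_scan (vals : List Int) (fb : Int) :
    (match (vals.foldl
        (fun (st : PySem.Set Int × Option Int × Int) v =>
          if PySem.Set.contains st.1 v then st
          else (PySem.Set.add st.1 v,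
                if st.2.2 < (PySem.List.count vals v : Int) then (some v, (PySem.List.count vals v : Int))
                else st.2))
        (PySem.Set.empty, none, 0)).2.1 with
      | some b => b
      | none => fb)
    = if vals = [] then fb else pvMode (PySem.Dict.counter vals) 0 := by
  by_cases hv : vals = []
  · subst hv; rfl
  · rw [if_neg hv]
    rw [pv_seen_fold vals
      (fun v (s : Option Int × Int) =>
        if s.2 < (PySem.List.count vals v : Int) then (some v, (PySem.List.count vals v : Int)) else s)
      PySem.Set.empty (none, 0)]
    have hfilt : ((PySem.Set.ofList vals).filter (fun v => !(PySem.Set.contains PySem.Set.empty v)))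
        = PySem.Set.ofList vals := by
      simp [PySem.Set.contains, PySem.Set.empty]
    rw [hfilt]
    obtain ⟨w, ws, hw⟩ := List.exists_cons_of_ne_nil hv
    have hwmem : w ∈ PySem.Set.ofList vals := by
      rw [PySem.Set.mem_ofList, hw]; exact List.mem_cons_self
    obtain ⟨k0, kt, hks⟩ := List.exists_cons_of_ne_nil (List.ne_nil_of_mem hwmem)
    have hc0 : (0 : Int) < (PySem.List.count vals k0 : Int) := by
      have : k0 ∈ vals := by
        rw [← PySem.Set.mem_ofList vals k0]; rw [hks]; exact List.mem_cons_self
      have hcnt : 0 < List.count k0 vals := List.count_pos_iff.mpr this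
      exact_mod_cast hcnt
    rw [hks, List.foldl_cons]
    simp only [if_pos hc0]
    have hmapfold : kt.foldl
        (fun (s : Option Int × Int) v =>
          if s.2 < (PySem.List.count vals v : Int) then (some v, (PySem.List.count vals v : Int)) else s)
        (some k0, (PySem.List.count vals k0 : Int))
        = (kt.map (fun v => (v, (PySem.List.count vals v : Int)))).foldl
            (fun (s : Option Int × Int) p => if s.2 < p.2 then (some p.1, p.2) else s)
            (some k0, (PySem.List.count vals k0 : Int)) := by
      rw [List.foldl_map]
    rw [hmapfold,
      pv_fold_argmax (kt.map (fun v => (v, (PySem.List.count vals v : Int))))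
        (k0, (PySem.List.count vals k0 : Int))]
    unfold pvMode
    rw [PySem.Dict.items_counter, hks, List.map_cons]
    have hfn : (fun k => (k, (List.count k vals : Int))) = (fun v => (v, (PySem.List.count vals v : Int))) := rfl
    have hhead : ((k0, (List.count k0 vals : Int)) : Int × Int) = (k0, (PySem.List.count vals k0 : Int)) := rfl
    rw [hfn, hhead,
      pv_max?_cons (kt.map (fun v => (v, (PySem.List.count vals v : Int))))
        (k0, (PySem.List.count vals k0 : Int))]

-- ===== VERDICT (by name: the statement is the Claim_ definition above) =====
theorem m_conditional_prev_spec : Claim_equal_m_conditional_prev := by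
  intro h_ pos _ _
  unfold Spec_m_conditional_prev m_conditional_prev m_conditional_prev_alt m_transition_port
  by_cases hp : pos = 0
  · subst hp
    exact (pv_core (PySem.List.pyRange 0 ((h_.length : Int) - 1) 1)
      (fun i => PySem.List.pyGetD (PySem.List.pyGetD h_ i []) 0 0)
      (fun i => PySem.List.pyGetD (PySem.List.pyGetD h_ (i + 1) []) 0 0)
      (PySem.List.pyGetD (PySem.List.pyGetD h_ (-1) []) 0 0)
      (PySem.List.pyGetD (PySem.List.pyGetD h_ (-1) []) 0 0)).trans
      (pv_scan _ (PySem.List.pyGetD (PySem.List.pyGetD h_ (-1) []) 0 0)).symm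
  · simp only [if_neg hp]
    exact (pv_core h_
      (fun x => PySem.List.pyGetD x (pos - 1) 0)
      (fun x => PySem.List.pyGetD x pos 0)
      (PySem.List.pyGetD (PySem.List.pyGetD h_ (-1) []) (pos - 1) 0)
      (PySem.List.pyGetD (PySem.List.pyGetD h_ (-1) []) pos 0)).trans
      (pv_scan _ (PySem.List.pyGetD (PySem.List.pyGetD h_ (-1) []) pos 0)).symm
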